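-- pv_equiv track=rewrite | github.com/CoDS-GCS/KGNET | GMLaaS/models/MorsE/pre_process.py | reidx
-- ===== SOURCE A (Python) =====
-- def reidx(tri):
--     tri_reidx = []
--     ent_reidx = dict()
--     entidx = 0
--     rel_reidx = dict()
--     relidx = 0
--     for h, r, t in tri:
--         if h not in ent_reidx.keys():
--             ent_reidx[h] = entidx
--             entidx += 1
--         if t not in ent_reidx.keys():
--             ent_reidx[t] = entidx
--             entidx += 1
--         if r not in rel_reidx.keys():
--             rel_reidx[r] = relidx
--             relidx += 1
--         tri_reidx.append([ent_reidx[h], rel_reidx[r], ent_reidx[t]])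
--     return tri_reidx, dict(rel_reidx), dict(ent_reidx)
-- ===== SOURCE B (Python) =====
-- def reidx(tri):
--     # Staged: first collect the distinct entities/relations in first-appearance
--     # order (dict.fromkeys dedups), then enumerate them into index maps, then
--     # translate the triples in a final pure mapping pass.
--     ents = dict.fromkeys(x for h, _, t in tri for x in (h, t))
--     rels = dict.fromkeys(r for _, r, _ in tri)
--     ent_reidx = {e: i for i, e in enumerate(ents)}
--     rel_reidx = {r: i for i, r in enumerate(rels)}
--     tri_reidx = [[ent_reidx[h], rel_reidx[r], ent_reidx[t]] for h, r, t in tri]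
--     return tri_reidx, rel_reidx, ent_reidx
-- ===== Notes on version B (the rewrite author's own statement) =====
-- stated objective: alternative
-- what changed: Replaces A's single pass with interleaved conditional inserts and explicit counters by a staged pipeline: dedup the entity/relation streams first (dict.fromkeys), enumerate them into index maps, then translate the triples in a separate pure mapping pass.
import Mathlib
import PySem

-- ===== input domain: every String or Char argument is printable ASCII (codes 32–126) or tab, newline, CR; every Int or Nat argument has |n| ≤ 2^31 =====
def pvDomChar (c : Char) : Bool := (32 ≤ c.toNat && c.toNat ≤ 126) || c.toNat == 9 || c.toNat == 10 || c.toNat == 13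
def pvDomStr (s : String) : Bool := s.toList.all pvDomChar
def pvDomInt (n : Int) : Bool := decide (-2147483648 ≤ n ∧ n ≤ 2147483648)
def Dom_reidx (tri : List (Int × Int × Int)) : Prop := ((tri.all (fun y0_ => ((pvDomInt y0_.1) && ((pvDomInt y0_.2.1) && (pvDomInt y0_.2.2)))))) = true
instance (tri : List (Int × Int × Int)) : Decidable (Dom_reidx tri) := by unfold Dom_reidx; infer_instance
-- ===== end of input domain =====

-- B replaces A's single conditional-insert pass by a staged pipeline:
-- dedup the streams, enumerate into index maps, then a pure mapping pass.

-- ===== PORT A =====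
-- A's loop: state (tri_reidx, ent_reidx, entidx, rel_reidx, relidx); each
-- `if k not in d.keys(): d[k] = idx; idx += 1` becomes the two ifs below;
-- ent_reidx[h] etc. are read after the guards guarantee the key is present,
-- so `getD _ 0` is exact there.
def reidxLoopA : List (Int × Int × Int) → List (List Int) →
    PySem.Dict Int Int → Int → PySem.Dict Int Int → Int →
    List (List Int) × PySem.Dict Int Int × PySem.Dict Int Int
  | [], triR, ent, _, rel, _ => (triR, rel, ent)
  | (h, r, t) :: rest, triR, ent, entidx, rel, relidx =>
    let ent1 := if ent.contains h then ent else ent.insert h entidx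
    let entidx1 := if ent.contains h then entidx else entidx + 1
    let ent2 := if ent1.contains t then ent1 else ent1.insert t entidx1
    let entidx2 := if ent1.contains t then entidx1 else entidx1 + 1
    let rel1 := if rel.contains r then rel else rel.insert r relidx
    let relidx1 := if rel.contains r then relidx else relidx + 1
    reidxLoopA rest (triR ++ [[ent2.getD h 0, rel1.getD r 0, ent2.getD t 0]])
      ent2 entidx2 rel1 relidx1

def reidx (tri : List (Int × Int × Int)) :
    List (List Int) × (List (Int × Int)) × (List (Int × Int)) :=
  let res := reidxLoopA tri [] PySem.Dict.empty 0 PySem.Dict.empty 0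
  (res.1, res.2.1.items, res.2.2.items)

-- ===== PORT B =====
-- dict.fromkeys(stream) = PySem.List.dedup; {k: i for i, k in enumerate(l)}
-- is a fold of inserts over PySem.List.enumerate; ent_reidx[h] is read only
-- on keys present by construction, so `getD _ 0` is exact.
def enumDict (l : List Int) : PySem.Dict Int Int :=
  (PySem.List.enumerate l).foldl (fun d p => d.insert p.2 p.1) PySem.Dict.empty

def reidx_alt (tri : List (Int × Int × Int)) :
    List (List Int) × (List (Int × Int)) × (List (Int × Int)) :=
  let ents := PySem.List.dedup (tri.flatMap fun p => [p.1, p.2.2])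
  let rels := PySem.List.dedup (tri.map (·.2.1))
  let entD := enumDict ents
  let relD := enumDict rels
  let rows := tri.map fun p => [entD.getD p.1 0, relD.getD p.2.1 0, entD.getD p.2.2 0]
  (rows, relD.items, entD.items)

-- ===== PRECONDITION & SPEC =====
def Spec_reidx (tri : List (Int × Int × Int)) (out : List (List Int) × (List (Int × Int)) × (List (Int × Int))) : Prop := out = reidx_alt tri
instance (tri : List (Int × Int × Int)) (out : List (List Int) × (List (Int × Int)) × (List (Int × Int))) : Decidable (Spec_reidx tri out) := by unfold Spec_reidx; infer_instance

-- ===== CLAIM (what is proved, stated in full; the proofs are below) =====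
def Claim_equal_reidx : Prop := ∀ (tri : List (Int × Int × Int)), Dom_reidx tri → Spec_reidx tri (reidx tri)

-- ===== LEMMAS AND PROOFS =====

-- A's conditional insert, with the counter pinned to the dict size
def insIdx (d : PySem.Dict Int Int) (k : Int) : PySem.Dict Int Int :=
  if d.contains k then d else d.insert k (d.size : Int)

lemma size_insIdx (d : PySem.Dict Int Int) (k : Int) :
    ((insIdx d k).size : Int) = if d.contains k then (d.size : Int) else (d.size : Int) + 1 := by
  unfold insIdx
  by_cases hc : d.contains k
  · simp [hc]
  · simp [hc, PySem.Dict.size_insert]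

lemma contains_insIdx_self (d : PySem.Dict Int Int) (k : Int) :
    (insIdx d k).contains k = true := by
  unfold insIdx
  by_cases hc : d.contains k
  · simp [hc]
  · simp [hc, PySem.Dict.contains_insert_self]

lemma contains_insIdx_of (d : PySem.Dict Int Int) (k j : Int)
    (hj : d.contains j = true) : (insIdx d k).contains j = true := by
  unfold insIdx
  by_cases hc : d.contains k
  · rw [if_pos hc]; exact hj
  · simp [hc, PySem.Dict.contains_insert, hj]

lemma getD_insIdx_of (d : PySem.Dict Int Int) (k j : Int)
    (hj : d.contains j = true) : (insIdx d k).getD j 0 = d.getD j 0 := by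
  unfold insIdx
  by_cases hc : d.contains k
  · simp [hc]
  · rw [if_neg hc]
    rcases eq_or_ne j k with rfl | hne
    · exact absurd hj hc
    · rw [PySem.Dict.getD_insert_of_ne _ _ _ hne]

-- lookups of already-present keys are stable under the rest of the fold
lemma getD_foldl_insIdx (ys : List Int) : ∀ (d : PySem.Dict Int Int) (j : Int),
    d.contains j = true → (ys.foldl insIdx d).getD j 0 = d.getD j 0 := by
  induction ys with
  | nil => intro d j _; rfl
  | cons y ys ih =>
    intro d j hj
    simp only [List.foldl_cons]
    rw [ih _ _ (contains_insIdx_of d y j hj), getD_insIdx_of d y j hj]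

-- the keys of A's fold are the deduped stream
lemma keys_foldl_insIdx (xs : List Int) :
    (xs.foldl insIdx PySem.Dict.empty).keys = PySem.List.dedup xs := by
  induction xs using List.reverseRecOn with
  | nil => simp [PySem.Dict.keys_empty]
  | append_singleton xs x ih =>
    rw [List.foldl_append, List.foldl_cons, List.foldl_nil]
    rw [PySem.List.dedup_eq_ofList] at *
    rw [PySem.Set.ofList_eq_foldl, List.foldl_append, List.foldl_cons, List.foldl_nil,
        ← PySem.Set.ofList_eq_foldl]
    rw [insIdx]
    by_cases hc : (xs.foldl insIdx PySem.Dict.empty).contains x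
    · have hx : x ∈ PySem.Set.ofList xs := by
        rw [← ih]; exact (PySem.Dict.contains_iff_mem_keys _ _).mp hc
      rw [if_pos hc, PySem.Set.add_of_mem hx, ih]
    · have hx : x ∉ PySem.Set.ofList xs := by
        rw [← ih]
        exact fun hm => hc ((PySem.Dict.contains_iff_mem_keys _ _).mpr hm)
      rw [if_neg hc, PySem.Set.add_of_not_mem hx,
          PySem.Dict.keys_insert_of_not_contains _ _ (by simpa using hc), ih]

lemma size_eq_keys_length (d : PySem.Dict Int Int) : d.size = d.keys.length := by
  simp [PySem.Dict.size, PySem.Dict.keys]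

-- B's enumerate-the-dedup dict IS A's conditional-insert fold
lemma enumDict_dedup (xs : List Int) :
    enumDict (PySem.List.dedup xs) = xs.foldl insIdx PySem.Dict.empty := by
  induction xs using List.reverseRecOn with
  | nil => rfl
  | append_singleton xs x ih =>
    rw [List.foldl_append, List.foldl_cons, List.foldl_nil]
    have hkeys := keys_foldl_insIdx xs
    rw [PySem.List.dedup_eq_ofList] at *
    rw [PySem.Set.ofList_eq_foldl, List.foldl_append, List.foldl_cons, List.foldl_nil,
        ← PySem.Set.ofList_eq_foldl]
    rw [insIdx]
    by_cases hc : (xs.foldl insIdx PySem.Dict.empty).contains x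
    · have hx : x ∈ PySem.Set.ofList xs := by
        rw [← hkeys]; exact (PySem.Dict.contains_iff_mem_keys _ _).mp hc
      rw [if_pos hc, PySem.Set.add_of_mem hx, ih]
    · have hx : x ∉ PySem.Set.ofList xs := by
        rw [← hkeys]
        exact fun hm => hc ((PySem.Dict.contains_iff_mem_keys _ _).mpr hm)
      rw [if_neg hc, PySem.Set.add_of_not_mem hx]
      unfold enumDict
      rw [PySem.List.enumerate_append, PySem.List.enumerate_cons, PySem.List.enumerate_nil,
          List.foldl_append, List.foldl_cons, List.foldl_nil]
      have hsize : ((xs.foldl insIdx PySem.Dict.empty).size : Int)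
          = (0 : Int) + (PySem.Set.ofList xs).length := by
        rw [size_eq_keys_length, hkeys]; omega
      rw [← hsize]
      exact congrArg (fun d => d.insert x ((xs.foldl insIdx PySem.Dict.empty).size : Int)) ih

-- the main loop, with counters pinned to sizes, against B's staged dicts
lemma loop_char (l : List (Int × Int × Int)) : ∀ (triR : List (List Int))
    (ent rel : PySem.Dict Int Int),
    reidxLoopA l triR ent (ent.size : Int) rel (rel.size : Int) =
      (triR ++ l.map (fun p =>
          [((l.flatMap fun q => [q.1, q.2.2]).foldl insIdx ent).getD p.1 0,
           ((l.map (·.2.1)).foldl insIdx rel).getD p.2.1 0,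
           ((l.flatMap fun q => [q.1, q.2.2]).foldl insIdx ent).getD p.2.2 0]),
       (l.map (·.2.1)).foldl insIdx rel,
       (l.flatMap fun q => [q.1, q.2.2]).foldl insIdx ent) := by
  induction l with
  | nil => intro triR ent rel; simp [reidxLoopA]
  | cons p rest ih =>
    obtain ⟨h, r, t⟩ := p
    intro triR ent rel
    simp only [reidxLoopA]
    have e1 : (if ent.contains h then ent else ent.insert h (ent.size : Int)) = insIdx ent h := rfl
    have r1 : (if rel.contains r then rel else rel.insert r (rel.size : Int)) = insIdx rel r := rfl
    rw [e1, ← size_insIdx, r1, ← size_insIdx]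
    have e2 : (if (insIdx ent h).contains t then insIdx ent h
        else (insIdx ent h).insert t ((insIdx ent h).size : Int)) = insIdx (insIdx ent h) t := rfl
    rw [e2, ← size_insIdx]
    rw [ih]
    simp only [List.flatMap_cons, List.map_cons, List.foldl_cons,
      List.cons_append, List.nil_append]
    rw [getD_foldl_insIdx _ _ _
          (contains_insIdx_of _ t h (contains_insIdx_self ent h)),
        getD_foldl_insIdx _ _ _ (contains_insIdx_self rel r),
        getD_foldl_insIdx _ _ _ (contains_insIdx_self (insIdx ent h) t)]
    simp

-- ===== VERDICT (by name: the statement is the Claim_ definition above) =====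
theorem reidx_spec : Claim_equal_reidx := by
  intro tri _
  show reidx tri = reidx_alt tri
  unfold reidx reidx_alt
  have h0 : ((PySem.Dict.empty : PySem.Dict Int Int).size : Int) = 0 := rfl
  have := loop_char tri [] PySem.Dict.empty PySem.Dict.empty
  rw [h0] at this
  simp only [enumDict_dedup]
  rw [this]
  simp
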